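-- pv_equiv track=rewrite | github.com/elin-d/SmartCatalog_Editor | tools.py | get_lastest_used
-- ===== SOURCE A (Python) =====
-- def get_lastest_used(current_list: list):
--     liste = list()
--
--     for chemin in reversed(current_list):
--
--         if chemin not in liste:
--             liste.append(chemin)
--
--         if len(liste) == 10:
--             break
--
--     liste.sort()
--     return liste
-- ===== SOURCE B (Python) =====
-- def get_lastest_used(current_list: list):
--     last = {chemin: i for i, chemin in enumerate(current_list)}
--     recent = sorted(last, key=last.__getitem__, reverse=True)[:10]
--     recent.sort()
--     return recent
-- ===== Notes on version B (the rewrite author's own statement) =====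
-- stated objective: alternative
-- what changed: Instead of scanning the reversed list with a membership test and breaking at 10, B makes one forward pass building a last-occurrence-index dict, sorts the keys by that index in reverse to get the 10 most recently used items, then sorts them.
import Mathlib
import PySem

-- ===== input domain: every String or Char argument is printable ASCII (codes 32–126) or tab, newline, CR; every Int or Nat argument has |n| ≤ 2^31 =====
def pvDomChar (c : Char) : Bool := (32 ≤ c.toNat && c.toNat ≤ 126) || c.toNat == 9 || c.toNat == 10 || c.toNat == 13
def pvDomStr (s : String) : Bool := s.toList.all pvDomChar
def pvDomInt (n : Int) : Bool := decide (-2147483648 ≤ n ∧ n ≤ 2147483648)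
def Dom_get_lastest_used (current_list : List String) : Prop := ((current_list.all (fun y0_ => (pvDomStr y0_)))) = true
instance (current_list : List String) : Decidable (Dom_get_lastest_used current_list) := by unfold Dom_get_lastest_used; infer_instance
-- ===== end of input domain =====

-- B replaces A's reversed scan with membership test and break by a different algorithm:
-- one forward pass records each item's LAST index in a dict, a reverse sort by that
-- index picks the 10 most recently used items, then they are sorted (alternative).

-- ===== PORT A =====
-- A's for-loop over reversed(current_list): append if unseen, break once 10 collected.
def getLoopA : List String → List String → List String
  | liste, [] => liste
  | liste, chemin :: rest =>
    let liste' := if liste.contains chemin then liste else liste ++ [chemin]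
    if liste'.length == 10 then liste' else getLoopA liste' rest

def get_lastest_used (current_list : List String) : List String :=
  PySem.List.sorted (getLoopA [] current_list.reverse) (fun x => x) false

-- ===== PORT B =====
-- {chemin: i for i, chemin in enumerate(current_list)}
def lastDict (current_list : List String) : PySem.Dict String Int :=
  (PySem.List.enumerate current_list).foldl (fun d p => d.insert p.2 p.1) PySem.Dict.empty

-- sorted(last, key=last.__getitem__, reverse=True)[:10]; then recent.sort().
-- (key lookup ported as getD _ 0: every element sorted is a key of the dict, so the
-- default is never used and Python's __getitem__ never raises here)
def get_lastest_used_alt (current_list : List String) : List String :=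
  PySem.List.sorted
    ((PySem.List.sorted (lastDict current_list).keys
        (fun x => (lastDict current_list).getD x 0) true).take 10)
    (fun x => x) false

-- ===== PRECONDITION & SPEC =====
def Spec_get_lastest_used (current_list : List String) (out : List String) : Prop := out = get_lastest_used_alt current_list
instance (current_list : List String) (out : List String) : Decidable (Spec_get_lastest_used current_list out) := by unfold Spec_get_lastest_used; infer_instance

-- ===== CLAIM (what is proved, stated in full; the proofs are below) =====
def Claim_equal_get_lastest_used : Prop := ∀ (current_list : List String), Dom_get_lastest_used current_list → Spec_get_lastest_used current_list (get_lastest_used current_list)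

-- ===== LEMMAS AND PROOFS =====

-- ---- A side: the break-at-10 loop is take 10 of the ordered dedup ----

-- A's loop step is exactly PySem.Set.add.
theorem step_eq_add (liste : List String) (c : String) :
    (if liste.contains c then liste else liste ++ [c]) = PySem.Set.add liste c := by
  simp [PySem.Set.add, PySem.Set.contains]

-- Set.update only appends to its accumulator.
theorem update_append (acc : List String) (xs : List String) :
    ∃ t, PySem.Set.update acc xs = acc ++ t := by
  induction xs generalizing acc with
  | nil => exact ⟨[], by simp [PySem.Set.update]⟩
  | cons c rest ih =>
    have hstep : PySem.Set.update acc (c :: rest) = PySem.Set.update (PySem.Set.add acc c) rest := by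
      simp [PySem.Set.update]
    obtain ⟨t, ht⟩ := ih (PySem.Set.add acc c)
    by_cases h : c ∈ acc
    · exact ⟨t, by rw [hstep, ht]; simp [PySem.Set.add, PySem.Set.contains, h]⟩
    · refine ⟨c :: t, ?_⟩
      rw [hstep, ht]
      simp [PySem.Set.add, PySem.Set.contains, h]

-- A's break-at-10 loop computes the first 10 elements of the full ordered dedup.
theorem getLoopA_eq_take (xs : List String) (acc : List String) (h : acc.length < 10) :
    getLoopA acc xs = (PySem.Set.update acc xs).take 10 := by
  induction xs generalizing acc with
  | nil =>
    simp [getLoopA, PySem.Set.update, List.take_of_length_le (Nat.le_of_lt h)]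
  | cons c rest ih =>
    have hupd : PySem.Set.update acc (c :: rest) = PySem.Set.update (PySem.Set.add acc c) rest := by
      simp [PySem.Set.update]
    rw [show getLoopA acc (c :: rest)
        = (if (PySem.Set.add acc c).length == 10 then PySem.Set.add acc c
           else getLoopA (PySem.Set.add acc c) rest) from by
      simp only [getLoopA, step_eq_add]]
    by_cases h10 : (PySem.Set.add acc c).length = 10
    · obtain ⟨t, ht⟩ := update_append (PySem.Set.add acc c) rest
      simp only [h10, beq_self_eq_true, if_true]
      rw [hupd, ht, ← h10, List.take_left]
    · have hlen : (PySem.Set.add acc c).length ≤ acc.length + 1 := by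
        simp [PySem.Set.add]; split <;> simp
      have : (PySem.Set.add acc c).length < 10 := by omega
      simp only [beq_iff_eq, h10, if_false]
      rw [ih _ this, hupd]

-- ---- dedup structure: dedup (y :: l) pulls y to the front ----

-- elements already in the accumulator may be dropped from the update list
theorem update_filter_of_mem (l : List String) (s : List String) (y : String) (hy : y ∈ s) :
    PySem.Set.update s l = PySem.Set.update s (l.filter (fun a => !(a == y))) := by
  induction l generalizing s with
  | nil => simp
  | cons a rest ih =>
    by_cases hay : a = y
    · subst hay
      have hadd : PySem.Set.add s a = s := by simp [PySem.Set.add, PySem.Set.contains, hy]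
      have hf : (a :: rest).filter (fun b => !(b == a)) = rest.filter (fun b => !(b == a)) := by
        simp
      rw [hf, show PySem.Set.update s (a :: rest) = PySem.Set.update (PySem.Set.add s a) rest from by
        simp [PySem.Set.update], hadd]
      exact ih s hy
    · have hmem : y ∈ PySem.Set.add s a := by
        simp [PySem.Set.add]; split <;> simp [hy]
      have hf : (a :: rest).filter (fun a => !(a == y))
          = a :: rest.filter (fun a => !(a == y)) := by simp [hay]
      rw [hf, show PySem.Set.update s (a :: rest) = PySem.Set.update (PySem.Set.add s a) rest from by
            simp [PySem.Set.update],
          show PySem.Set.update s (a :: rest.filter (fun a => !(a == y)))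
              = PySem.Set.update (PySem.Set.add s a) (rest.filter (fun a => !(a == y))) from by
            simp [PySem.Set.update]]
      exact ih _ hmem

-- an element absent from the update list floats as head of the accumulator
theorem update_cons_of_not_mem (l : List String) (s : List String) (y : String) (hy : y ∉ l) :
    PySem.Set.update (y :: s) l = y :: PySem.Set.update s l := by
  induction l generalizing s with
  | nil => simp [PySem.Set.update]
  | cons a rest ih =>
    have hay : a ≠ y := fun h => hy (by simp [h])
    have hrest : y ∉ rest := fun h => hy (by simp [h])
    have hadd : PySem.Set.add (y :: s) a = y :: PySem.Set.add s a := by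
      simp [PySem.Set.add, PySem.Set.contains, hay]
      split <;> simp
    rw [show PySem.Set.update (y :: s) (a :: rest)
          = PySem.Set.update (PySem.Set.add (y :: s) a) rest from by simp [PySem.Set.update],
        hadd, ih _ hrest,
        show PySem.Set.update s (a :: rest) = PySem.Set.update (PySem.Set.add s a) rest from by
          simp [PySem.Set.update]]

-- add commutes with filter
theorem add_filter (s : List String) (a : String) (p : String → Bool) :
    (PySem.Set.add s a).filter p = if p a then PySem.Set.add (s.filter p) a else s.filter p := by
  by_cases hpa : p a = true
  · by_cases hm : a ∈ s
    · have : a ∈ s.filter p := List.mem_filter.mpr ⟨hm, hpa⟩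
      simp [PySem.Set.add, PySem.Set.contains, hm, this, hpa]
    · have : a ∉ s.filter p := fun h => hm (List.mem_filter.mp h).1
      simp [PySem.Set.add, PySem.Set.contains, hm, this, hpa]
  · simp only [Bool.not_eq_true] at hpa
    simp [PySem.Set.add, PySem.Set.contains, hpa]
    split <;> simp [hpa]

-- update commutes with filter
theorem update_filter_comm (l : List String) (s : List String) (p : String → Bool) :
    (PySem.Set.update s l).filter p = PySem.Set.update (s.filter p) (l.filter p) := by
  induction l generalizing s with
  | nil => simp [PySem.Set.update]
  | cons a rest ih =>
    rw [show PySem.Set.update s (a :: rest) = PySem.Set.update (PySem.Set.add s a) rest from by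
      simp [PySem.Set.update]]
    rw [ih, add_filter]
    by_cases hpa : p a = true
    · have hf : (a :: rest).filter p = a :: rest.filter p := by simp [hpa]
      rw [hf, if_pos hpa,
        show PySem.Set.update (s.filter p) (a :: rest.filter p)
          = PySem.Set.update (PySem.Set.add (s.filter p) a) (rest.filter p) from by
        simp [PySem.Set.update]]
    · simp only [Bool.not_eq_true] at hpa
      simp [hpa]

-- dedup of a cons: head, then the dedup of the tail with the head filtered out
theorem dedup_cons (y : String) (l : List String) :
    PySem.List.dedup (y :: l) = y :: (PySem.List.dedup l).filter (fun a => !(a == y)) := by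
  have h1 : PySem.List.dedup (y :: l) = PySem.Set.update [y] l := by
    simp [PySem.List.dedup_eq_ofList, PySem.Set.ofList_eq_foldl, PySem.Set.update,
      PySem.Set.add, PySem.Set.contains]
  have h2 : PySem.Set.update [y] l = PySem.Set.update [y] (l.filter (fun a => !(a == y))) :=
    update_filter_of_mem l [y] y (by simp)
  have hynot : y ∉ l.filter (fun a => !(a == y)) := by
    intro h; simpa using (List.mem_filter.mp h).2
  have h3 : PySem.Set.update [y] (l.filter (fun a => !(a == y)))
      = y :: PySem.Set.update [] (l.filter (fun a => !(a == y))) :=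
    update_cons_of_not_mem _ [] y hynot
  have h4 : PySem.Set.update ([] : List String) (l.filter (fun a => !(a == y)))
      = (PySem.Set.update ([] : List String) l).filter (fun a => !(a == y)) := by
    rw [update_filter_comm]; simp
  rw [h1, h2, h3, h4]
  simp [PySem.Set.update_nil_left, PySem.List.dedup_eq_ofList]

-- ---- B side: the last-occurrence dict ----

theorem lastDict_append (xs : List String) (y : String) :
    lastDict (xs ++ [y]) = (lastDict xs).insert y (xs.length : Int) := by
  unfold lastDict
  rw [PySem.List.enumerate_append]
  simp [PySem.List.enumerate_cons, PySem.List.enumerate_nil, List.foldl_append]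

theorem getD_lastDict_append (xs : List String) (y : String) (k : String) :
    (lastDict (xs ++ [y])).getD k 0
      = if k = y then (xs.length : Int) else (lastDict xs).getD k 0 := by
  rw [lastDict_append, PySem.Dict.getD_insert]

-- the stored index of a present element is below the list's length
theorem getD_lastDict_lt (xs : List String) (k : String) (h : k ∈ xs) :
    (lastDict xs).getD k 0 < (xs.length : Int) := by
  induction xs using List.reverseRecOn with
  | nil => simp at h
  | append_singleton xs y ih =>
    rw [getD_lastDict_append]
    by_cases hk : k = y
    · simp [hk]
    · have hx : k ∈ xs := by
        rcases List.mem_append.mp h with h' | h'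
        · exact h'
        · exact absurd (by simpa using h') hk
      have := ih hx
      simp only [if_neg hk, List.length_append, List.length_cons, List.length_nil]
      push_cast
      omega

-- dedup of the reversed list is strictly decreasing in last-occurrence index
theorem pairwise_lastIdx (xs : List String) :
    (PySem.List.dedup xs.reverse).Pairwise
      (fun a b => (lastDict xs).getD b 0 < (lastDict xs).getD a 0) := by
  induction xs using List.reverseRecOn with
  | nil => simp
  | append_singleton xs y ih =>
    rw [show (xs ++ [y]).reverse = y :: xs.reverse by simp, dedup_cons]
    constructor
    · intro b hb
      have hbne : b ≠ y := by
        have := (List.mem_filter.mp hb).2; simpa using this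
      have hbx : b ∈ xs := by
        have h' := (List.mem_filter.mp hb).1
        simp at h'
        exact h'
      rw [getD_lastDict_append, getD_lastDict_append, if_pos rfl, if_neg hbne]
      exact getD_lastDict_lt xs b hbx
    · have hsub : (PySem.List.dedup xs.reverse).filter (fun a => !(a == y))
          |>.Sublist (PySem.List.dedup xs.reverse) := List.filter_sublist
      have hpw := ih.sublist hsub
      refine List.Pairwise.imp_of_mem ?_ hpw
      intro a b ha hb hab
      have hane : a ≠ y := by have := (List.mem_filter.mp ha).2; simpa using this
      have hbne : b ≠ y := by have := (List.mem_filter.mp hb).2; simpa using this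
      rwa [getD_lastDict_append, getD_lastDict_append, if_neg hane, if_neg hbne]

-- the dict's keys are the distinct elements in first-occurrence order
theorem keys_lastDict (xs : List String) : (lastDict xs).keys = PySem.List.dedup xs := by
  unfold lastDict
  rw [PySem.Dict.keys_foldl_insert_key (PySem.List.enumerate xs)
    (fun p => p.2) (fun _ p => p.1) PySem.Dict.empty]
  simp [PySem.List.map_snd_enumerate, PySem.Set.update_nil_left, PySem.List.dedup_eq_ofList]

-- B's reverse sort by last index IS A's collection order: the dedup of the reversed list
theorem sorted_keys_eq_dedup_reverse (xs : List String) :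
    PySem.List.sorted (lastDict xs).keys (fun x => (lastDict xs).getD x 0) true
      = PySem.List.dedup xs.reverse := by
  apply PySem.List.sorted_rev_eq_of_perm_of_pairwise_gt
  · rw [keys_lastDict]
    refine (List.perm_ext_iff_of_nodup (PySem.List.nodup_dedup _) (PySem.List.nodup_dedup _)).mpr ?_
    intro a
    simp
  · exact pairwise_lastIdx xs

-- ===== VERDICT (by name: the statement is the Claim_ definition above) =====
theorem get_lastest_used_spec : Claim_equal_get_lastest_used := by
  intro l _
  unfold Spec_get_lastest_used get_lastest_used get_lastest_used_alt
  rw [getLoopA_eq_take _ _ (by simp), sorted_keys_eq_dedup_reverse]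
  have : PySem.Set.update ([] : List String) l.reverse = PySem.List.dedup l.reverse := by
    simp [PySem.Set.update_nil_left, PySem.List.dedup_eq_ofList]
  rw [this]
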